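-- pv_equiv track=rewrite | github.com/elifesciences/bigquery-views-manager | bigquery_views_manager/view_list.py | add_names_with_referenced_names_recursively
-- ===== SOURCE A (Python) =====
-- from typing import Dict, List, Set, Union
--
-- def add_names_with_referenced_names_recursively(
--         result_name_list: List[str],
--         name_list: List[str],
--         referenced_names_by_name_map: Dict[str, List[str]],
-- ) -> List[str]:
--     for name in name_list:
--         add_names_with_referenced_names_recursively(
--             result_name_list,
--             referenced_names_by_name_map.get(name, []),
--             referenced_names_by_name_map,
--         )
--         if name not in result_name_list:
--             result_name_list.append(name)
--     return result_name_list
-- ===== SOURCE B (Python) =====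
-- def add_names_with_referenced_names_recursively(
--         result_name_list,
--         name_list,
--         referenced_names_by_name_map,
-- ):
--     # Memoized post-order DFS: 'done' skips names whose whole dependency
--     # closure has already been emitted; 'in_result' gives O(1) membership.
--     # Mutates result_name_list in place (same as the original) and returns it.
--     in_result = set(result_name_list)
--     done = set()
--
--     def visit(name):
--         if name in done:
--             return
--         done.add(name)
--         for dep in referenced_names_by_name_map.get(name, []):
--             visit(dep)
--         if name not in in_result:
--             result_name_list.append(name)
--             in_result.add(name)
--
--     for name in name_list:
--         visit(name)
--     return result_name_list
-- ===== Notes on version B (the rewrite author's own statement) =====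
-- stated objective: faster
-- what changed: Replaces A's unmemoized re-recursion (which re-expands every referenced name's whole dependency tree on each mention and does O(n) list membership tests) by a memoized post-order DFS with a 'done' set that visits each name once and a set-backed membership test.
import Mathlib
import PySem

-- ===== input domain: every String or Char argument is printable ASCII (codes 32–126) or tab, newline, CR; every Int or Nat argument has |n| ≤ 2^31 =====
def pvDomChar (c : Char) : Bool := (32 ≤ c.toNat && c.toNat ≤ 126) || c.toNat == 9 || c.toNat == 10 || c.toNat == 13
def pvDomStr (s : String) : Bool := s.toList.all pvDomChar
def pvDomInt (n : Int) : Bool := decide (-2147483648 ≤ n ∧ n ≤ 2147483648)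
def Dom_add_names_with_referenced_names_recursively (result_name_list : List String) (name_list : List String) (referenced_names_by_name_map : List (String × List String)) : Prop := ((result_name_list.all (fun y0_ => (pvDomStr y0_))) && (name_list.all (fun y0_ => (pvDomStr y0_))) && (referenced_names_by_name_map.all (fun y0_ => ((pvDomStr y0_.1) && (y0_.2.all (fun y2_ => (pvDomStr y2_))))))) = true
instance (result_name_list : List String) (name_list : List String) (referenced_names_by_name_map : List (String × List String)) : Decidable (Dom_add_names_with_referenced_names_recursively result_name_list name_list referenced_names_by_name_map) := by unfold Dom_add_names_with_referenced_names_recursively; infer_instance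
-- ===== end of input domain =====

-- B replaces A's unmemoized re-recursion (O(n) list membership, re-expansion of every
-- reference) by a memoized post-order DFS with a done-set and a set-backed membership
-- test; both mutate result_name_list in place in the Python and return it.

-- referenced_names_by_name_map.get(name, []) — shared dict primitive of both Pythons
def pvGetRefs (m : List (String × List String)) (k : String) : List String :=
  PySem.Dict.getD (PySem.Dict.mk m) k []

-- ===== PORT A =====
-- A's recursion, with a fuel counter that only bounds the recursion DEPTH (a totality
-- guard): under Pre_ (no reference cycle reachable from name_list) a depth of
-- m.length + 1 is never exhausted, because a descending chain of keys is duplicate-free.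
def addNamesA (m : List (String × List String)) : Nat → List String → List String → List String
  | _, result, [] => result
  | 0, result, _ :: _ => result
  | fuel + 1, result, name :: rest =>
      let r1 := addNamesA m fuel result (pvGetRefs m name)
      let r2 := if name ∈ r1 then r1 else r1 ++ [name]
      addNamesA m (fuel + 1) r2 rest
termination_by fuel _ ns => (fuel, ns.length)

def add_names_with_referenced_names_recursively (result_name_list : List String) (name_list : List String) (referenced_names_by_name_map : List (String × List String)) : List String :=
  addNamesA referenced_names_by_name_map (referenced_names_by_name_map.length + 1) result_name_list name_list

-- ===== PORT B =====
-- B's visit(name) on the state (result_name_list, in_result, done); the same fuel-style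
-- depth guard stands in for Python's call stack and is never exhausted under Pre_.
def visitB (m : List (String × List String)) : Nat → (List String × PySem.Set String × PySem.Set String) → String → (List String × PySem.Set String × PySem.Set String)
  | 0, st, _ => st
  | fuel + 1, st, name =>
      if name ∈ st.2.2 then st
      else
        let st1 : List String × PySem.Set String × PySem.Set String :=
          (st.1, st.2.1, PySem.Set.add st.2.2 name)
        let st2 := (pvGetRefs m name).foldl (visitB m fuel) st1
        if name ∈ st2.2.1 then st2
        else (st2.1 ++ [name], PySem.Set.add st2.2.1 name, st2.2.2)

def add_names_with_referenced_names_recursively_alt (result_name_list : List String) (name_list : List String) (referenced_names_by_name_map : List (String × List String)) : List String :=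
  (name_list.foldl (visitB referenced_names_by_name_map (referenced_names_by_name_map.length + 1))
    (result_name_list, PySem.Set.ofList result_name_list, PySem.Set.empty)).1

-- ===== PRECONDITION & SPEC =====
-- Reachability approximation used by Pre_: saturate a node set under "add the
-- referenced names" enough times that it contains everything reachable.
def pvOneStep (m : List (String × List String)) (s : List String) : List String :=
  s ∪ s.flatMap (pvGetRefs m)

def pvSat (m : List (String × List String)) : Nat → List String → List String
  | 0, s => s
  | n + 1, s => pvSat m n (pvOneStep m s)

def pvBound (m : List (String × List String)) (s : List String) : Nat :=
  s.length + (m.flatMap (fun p => p.2)).length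

def pvReach (m : List (String × List String)) (s : List String) : List String :=
  pvSat m (pvBound m s) s

-- A recurses into every referenced name BEFORE its membership check, so it raises
-- RecursionError whenever a reference cycle is reachable from name_list; Pre_ excludes
-- exactly those inputs (B returns a value there — see Raises_ below).
def Pre_add_names_with_referenced_names_recursively (result_name_list : List String) (name_list : List String) (referenced_names_by_name_map : List (String × List String)) : Prop :=
  ∀ k ∈ pvReach referenced_names_by_name_map name_list,
    k ∉ pvReach referenced_names_by_name_map (pvGetRefs referenced_names_by_name_map k)
instance (result_name_list : List String) (name_list : List String) (referenced_names_by_name_map : List (String × List String)) : Decidable (Pre_add_names_with_referenced_names_recursively result_name_list name_list referenced_names_by_name_map) := by unfold Pre_add_names_with_referenced_names_recursively; infer_instance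

def pvWitness_add_names_with_referenced_names_recursively : List String × List String × (List (String × List String)) :=
  (["x"], ["a", "b"], [("a", ["b", "c"])])

def Spec_add_names_with_referenced_names_recursively (result_name_list : List String) (name_list : List String) (referenced_names_by_name_map : List (String × List String)) (out : List String) : Prop := out = add_names_with_referenced_names_recursively_alt result_name_list name_list referenced_names_by_name_map
instance (result_name_list : List String) (name_list : List String) (referenced_names_by_name_map : List (String × List String)) (out : List String) : Decidable (Spec_add_names_with_referenced_names_recursively result_name_list name_list referenced_names_by_name_map out) := by unfold Spec_add_names_with_referenced_names_recursively; infer_instance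

-- ===== CLAIM (what is proved, stated in full; the proofs are below) =====
def Claim_equal_add_names_with_referenced_names_recursively : Prop := ∀ (result_name_list : List String) (name_list : List String) (referenced_names_by_name_map : List (String × List String)), Dom_add_names_with_referenced_names_recursively result_name_list name_list referenced_names_by_name_map → Pre_add_names_with_referenced_names_recursively result_name_list name_list referenced_names_by_name_map → Spec_add_names_with_referenced_names_recursively result_name_list name_list referenced_names_by_name_map (add_names_with_referenced_names_recursively result_name_list name_list referenced_names_by_name_map)

-- ===== LEMMAS AND PROOFS =====

-- edge x → y of the reference graph, and reachability
def pvEdge (m : List (String × List String)) (x y : String) : Prop := y ∈ pvGetRefs m x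
def pvReaches (m : List (String × List String)) : String → String → Prop :=
  Relation.ReflTransGen (pvEdge m)
-- "x is fully emitted into r": everything reachable from x is a member of r
def pvClosed (m : List (String × List String)) (r : List String) (x : String) : Prop :=
  ∀ y, pvReaches m x y → y ∈ r
def pvKeys (m : List (String × List String)) : Finset String := (m.map Prod.fst).toFinset

theorem pvClosed_mono {m : List (String × List String)} {r r' : List String} {x : String}
    (h : pvClosed m r x) (hsub : ∀ y ∈ r, y ∈ r') : pvClosed m r' x :=
  fun y hy => hsub y (h y hy)

theorem pvClosed_of_edge {m : List (String × List String)} {r : List String} {x d : String}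
    (h : pvClosed m r x) (hd : d ∈ pvGetRefs m x) : pvClosed m r d :=
  fun y hy => h y (Relation.ReflTransGen.head hd hy)

theorem mem_pvGetRefs_values {m : List (String × List String)} {k x : String}
    (h : x ∈ pvGetRefs m k) : x ∈ m.flatMap (fun p => p.2) := by
  unfold pvGetRefs PySem.Dict.getD PySem.Dict.get? at h
  rcases hfind : List.find? (fun p => p.1 == k) (PySem.Dict.mk m).items with _ | p
  · rw [hfind] at h; simp at h
  · rw [hfind] at h; simp at h
    exact List.mem_flatMap.mpr ⟨p, List.mem_of_find?_eq_some hfind, h⟩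

theorem pvGetRefs_of_not_key {m : List (String × List String)} {k : String}
    (h : k ∉ pvKeys m) : pvGetRefs m k = [] := by
  unfold pvGetRefs PySem.Dict.getD PySem.Dict.get?
  rw [List.find?_eq_none.mpr]
  · rfl
  · intro p hp hbeq
    refine absurd ?_ h
    have : p.1 = k := by simpa using hbeq
    simp only [pvKeys, List.mem_toFinset, List.mem_map]
    exact ⟨p, by simpa using hp, this⟩

theorem mem_pvOneStep {m : List (String × List String)} {s : List String} {x : String} :
    x ∈ pvOneStep m s ↔ x ∈ s ∨ ∃ z ∈ s, x ∈ pvGetRefs m z := by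
  simp [pvOneStep, List.mem_union_iff, List.mem_flatMap]

theorem pvSat_succ_outer (m : List (String × List String)) (n : Nat) (s : List String) :
    pvSat m (n + 1) s = pvOneStep m (pvSat m n s) := by
  induction n generalizing s with
  | zero => rfl
  | succ n ih => show pvSat m (n + 1) (pvOneStep m s) = _; rw [ih]; rfl

theorem subset_pvSat (m : List (String × List String)) (n : Nat) (s : List String) :
    ∀ x ∈ s, x ∈ pvSat m n s := by
  induction n generalizing s with
  | zero => intro x hx; exact hx
  | succ n ih => intro x hx; exact ih _ x (mem_pvOneStep.mpr (Or.inl hx))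

theorem pvSat_subset_univ (m : List (String × List String)) (s : List String) :
    ∀ n x, x ∈ pvSat m n s → x ∈ s ++ m.flatMap (fun p => p.2) := by
  intro n
  induction n generalizing s with
  | zero => intro x hx; exact List.mem_append.mpr (Or.inl hx)
  | succ n ih =>
    intro x hx
    have hx' : x ∈ pvSat m n (pvOneStep m s) := hx
    rcases List.mem_append.mp (ih (pvOneStep m s) x hx') with h1 | h2
    · rcases mem_pvOneStep.mp h1 with h3 | ⟨z, _, hr⟩
      · exact List.mem_append.mpr (Or.inl h3)
      · exact List.mem_append.mpr (Or.inr (mem_pvGetRefs_values hr))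
    · exact List.mem_append.mpr (Or.inr h2)

theorem pvClosed_step (m : List (String × List String)) (s : List String) (n : Nat)
    (h : ∀ x ∈ pvOneStep m (pvSat m n s), x ∈ pvSat m n s) :
    ∀ x ∈ pvOneStep m (pvSat m (n + 1) s), x ∈ pvSat m (n + 1) s := by
  have hEq : ∀ x, x ∈ pvSat m (n + 1) s ↔ x ∈ pvSat m n s := by
    intro x
    constructor
    · intro hx; rw [pvSat_succ_outer] at hx; exact h x hx
    · intro hx; rw [pvSat_succ_outer]; exact mem_pvOneStep.mpr (Or.inl hx)
  intro x hx
  rcases mem_pvOneStep.mp hx with h1 | ⟨z, hz, hr⟩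
  · exact h1
  · exact (hEq x).mpr (h x (mem_pvOneStep.mpr (Or.inr ⟨z, (hEq z).mp hz, hr⟩)))

theorem pvClosed_of_le (m : List (String × List String)) (s : List String) {n k : Nat}
    (hnk : n ≤ k) (h : ∀ x ∈ pvOneStep m (pvSat m n s), x ∈ pvSat m n s) :
    ∀ x ∈ pvOneStep m (pvSat m k s), x ∈ pvSat m k s := by
  induction k, hnk using Nat.le_induction with
  | base => exact h
  | succ k _ ih => exact pvClosed_step m s k ih

theorem pvReach_closed (m : List (String × List String)) (s : List String) :
    ∀ x ∈ pvOneStep m (pvReach m s), x ∈ pvReach m s := by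
  have key : ∀ n : Nat, (∃ k, k < n ∧ (∀ x ∈ pvOneStep m (pvSat m k s), x ∈ pvSat m k s)) ∨
      n ≤ (pvSat m n s).toFinset.card := by
    intro n
    induction n with
    | zero => exact Or.inr (Nat.zero_le _)
    | succ n ih =>
      rcases ih with ⟨k, hk, hc⟩ | hcard
      · exact Or.inl ⟨k, Nat.lt_succ_of_lt hk, hc⟩
      · by_cases hcl : ∀ x ∈ pvOneStep m (pvSat m n s), x ∈ pvSat m n s
        · exact Or.inl ⟨n, Nat.lt_succ_self n, hcl⟩
        · right
          push Not at hcl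
          obtain ⟨x, hx1, hx2⟩ := hcl
          have hsub : (pvSat m n s).toFinset ⊆ (pvSat m (n + 1) s).toFinset := by
            intro y hy
            simp only [List.mem_toFinset] at *
            rw [pvSat_succ_outer]
            exact mem_pvOneStep.mpr (Or.inl hy)
          have hx3 : x ∈ (pvSat m (n + 1) s).toFinset := by
            simp only [List.mem_toFinset]
            rw [pvSat_succ_outer]
            exact hx1
          have hss : (pvSat m n s).toFinset ⊂ (pvSat m (n + 1) s).toFinset :=
            ⟨hsub, fun hsub' => hx2 (by simpa using hsub' hx3)⟩
          have := Finset.card_lt_card hss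
          omega
  have hbound : ∀ n, (pvSat m n s).toFinset.card ≤ pvBound m s := by
    intro n
    have hsub : (pvSat m n s).toFinset ⊆ (s ++ m.flatMap (fun p => p.2)).toFinset := by
      intro x hx
      simp only [List.mem_toFinset] at *
      exact pvSat_subset_univ m s n x hx
    calc (pvSat m n s).toFinset.card ≤ _ := Finset.card_le_card hsub
      _ ≤ (s ++ m.flatMap (fun p => p.2)).length := List.toFinset_card_le _
      _ = pvBound m s := by simp [pvBound]
  rcases key (pvBound m s + 1) with ⟨k, hk, hc⟩ | hcard
  · exact pvClosed_of_le m s (by omega : k ≤ pvBound m s) hc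
  · exact absurd (le_trans hcard (hbound _)) (by omega)

-- completeness of the saturation: everything reachable from s is in pvReach m s
theorem pvReaches_mem_pvReach {m : List (String × List String)} {s : List String} {x y : String}
    (hr : pvReaches m x y) (hx : x ∈ s) : y ∈ pvReach m s := by
  induction hr with
  | refl => exact subset_pvSat m (pvBound m s) s x hx
  | tail _ hedge ih =>
    exact pvReach_closed m s _ (mem_pvOneStep.mpr (Or.inr ⟨_, ih, hedge⟩))

theorem transGen_head_decomp {α} {r : α → α → Prop} {a b : α} (h : Relation.TransGen r a b) :
    ∃ c, r a c ∧ Relation.ReflTransGen r c b := by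
  induction h using Relation.TransGen.head_induction_on with
  | single h => exact ⟨_, h, .refl⟩
  | head h htg _ => exact ⟨_, h, htg.to_reflTransGen⟩

-- Pre_ ⇒ no node reachable from name_list lies on a cycle
theorem pre_acyclic {r ns : List String} {m : List (String × List String)}
    (hpre : Pre_add_names_with_referenced_names_recursively r ns m)
    {x : String} (hx : ∃ nm ∈ ns, pvReaches m nm x) :
    ¬ Relation.TransGen (pvEdge m) x x := by
  obtain ⟨nm, hnm, hreach⟩ := hx
  intro hcyc
  have hx1 : x ∈ pvReach m ns := pvReaches_mem_pvReach hreach hnm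
  obtain ⟨c, hedge, hrt⟩ := transGen_head_decomp hcyc
  exact hpre x hx1 (pvReaches_mem_pvReach hrt hedge)

-- A is a no-op on a list of already-closed names (any fuel)
theorem addNamesA_noop (m : List (String × List String)) :
    ∀ (fuel : Nat) (ns r : List String), (∀ nm ∈ ns, pvClosed m r nm) →
      addNamesA m fuel r ns = r := by
  intro fuel
  induction fuel with
  | zero => intro ns r _; cases ns <;> simp [addNamesA]
  | succ fuel ihf =>
    intro ns
    induction ns with
    | nil => intro r _; simp [addNamesA]
    | cons name rest ihns =>
      intro r h
      have hname := h name (List.mem_cons_self)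
      have h1 : addNamesA m fuel r (pvGetRefs m name) = r :=
        ihf _ r (fun d hd => pvClosed_of_edge hname hd)
      have hmem : name ∈ r := hname name Relation.ReflTransGen.refl
      simp only [addNamesA, h1, if_pos hmem]
      exact ihns r (fun nm hnm => h nm (List.mem_cons_of_mem _ hnm))

-- the simulation invariant: A's loop and B's memoized fold agree and keep the invariants
theorem mainSim (m : List (String × List String)) :
    ∀ (fuel : Nat) (ns r inres done : List String) (P : Finset String),
      (pvKeys m \ P).card < fuel →
      (∀ nm ∈ ns, ∀ y, pvReaches m nm y → y ∉ P ∧ ¬ Relation.TransGen (pvEdge m) y y) →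
      (∀ x ∈ done, x ∈ P ∨ pvClosed m r x) →
      (∀ x, x ∈ inres ↔ x ∈ r) →
      addNamesA m fuel r ns = (ns.foldl (visitB m fuel) (r, inres, done)).1 ∧
      (∀ x, x ∈ (ns.foldl (visitB m fuel) (r, inres, done)).2.1 ↔ x ∈ addNamesA m fuel r ns) ∧
      (∀ x ∈ (ns.foldl (visitB m fuel) (r, inres, done)).2.2, x ∈ P ∨ pvClosed m (addNamesA m fuel r ns) x) ∧
      (∀ x ∈ r, x ∈ addNamesA m fuel r ns) ∧
      (∀ nm ∈ ns, pvClosed m (addNamesA m fuel r ns) nm) := by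
  intro fuel
  induction fuel with
  | zero => intro ns r inres done P h1 _ _ _; exact absurd h1 (Nat.not_lt_zero _)
  | succ fuel ihf =>
    intro ns
    induction ns with
    | nil =>
      intro r inres done P _ _ h3 h4
      have hA0 : addNamesA m (fuel + 1) r [] = r := by simp [addNamesA]
      rw [List.foldl_nil, hA0]
      exact ⟨rfl, h4, h3, fun x hx => hx, fun nm hnm => absurd hnm (List.not_mem_nil)⟩
    | cons name rest ihns =>
      intro r inres done P h1 h2 h3 h4
      have h2name := h2 name List.mem_cons_self
      have h2rest : ∀ nm ∈ rest, ∀ y, pvReaches m nm y → y ∉ P ∧ ¬ Relation.TransGen (pvEdge m) y y :=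
        fun nm hnm => h2 nm (List.mem_cons_of_mem _ hnm)
      by_cases hdone : name ∈ done
      · -- the memoized skip: name is already fully emitted, A's pass over it is a no-op
        have hcl : pvClosed m r name := by
          rcases h3 name hdone with hP | hcl
          · exact absurd hP (h2name name Relation.ReflTransGen.refl).1
          · exact hcl
        have hv : visitB m (fuel + 1) (r, inres, done) name = (r, inres, done) := by
          simp [visitB, hdone]
        have h1' : addNamesA m fuel r (pvGetRefs m name) = r :=
          addNamesA_noop m fuel _ r (fun d hd => pvClosed_of_edge hcl hd)
        have hA : addNamesA m (fuel + 1) r (name :: rest) = addNamesA m (fuel + 1) r rest := by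
          simp only [addNamesA, h1', if_pos (hcl name Relation.ReflTransGen.refl)]
        obtain ⟨hC1, hC2, hC3, hC4, hC5⟩ := ihns r inres done P h1 h2rest h3 h4
        rw [List.foldl_cons, hv, hA]
        refine ⟨hC1, hC2, hC3, hC4, ?_⟩
        intro nm hnm
        rcases List.mem_cons.mp hnm with rfl | hnm
        · exact pvClosed_mono hcl hC4
        · exact hC5 nm hnm
      · -- a real visit: process the references with one fuel less, then append name
        have hnP : name ∉ P := (h2name name Relation.ReflTransGen.refl).1
        have hDeps : addNamesA m fuel r (pvGetRefs m name) =
              (List.foldl (visitB m fuel) (r, inres, PySem.Set.add done name) (pvGetRefs m name)).1 ∧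
            (∀ x, x ∈ (List.foldl (visitB m fuel) (r, inres, PySem.Set.add done name) (pvGetRefs m name)).2.1 ↔
              x ∈ addNamesA m fuel r (pvGetRefs m name)) ∧
            (∀ x ∈ (List.foldl (visitB m fuel) (r, inres, PySem.Set.add done name) (pvGetRefs m name)).2.2,
              x ∈ insert name P ∨ pvClosed m (addNamesA m fuel r (pvGetRefs m name)) x) ∧
            (∀ x ∈ r, x ∈ addNamesA m fuel r (pvGetRefs m name)) ∧
            (∀ d ∈ pvGetRefs m name, pvClosed m (addNamesA m fuel r (pvGetRefs m name)) d) := by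
          by_cases hk : name ∈ pvKeys m
          · apply ihf (pvGetRefs m name) r inres (PySem.Set.add done name) (insert name P)
            · have hmem : name ∈ pvKeys m \ P := Finset.mem_sdiff.mpr ⟨hk, hnP⟩
              have herase : pvKeys m \ insert name P = (pvKeys m \ P).erase name := by
                ext z
                simp only [Finset.mem_sdiff, Finset.mem_erase, Finset.mem_insert]
                tauto
              have := Finset.card_erase_lt_of_mem hmem
              rw [herase]
              omega
            · intro d hd y hy
              have hy' : pvReaches m name y := Relation.ReflTransGen.head hd hy
              refine ⟨?_, (h2name y hy').2⟩
              intro hyP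
              rcases Finset.mem_insert.mp hyP with rfl | hyP
              · exact (h2name y Relation.ReflTransGen.refl).2 (Relation.TransGen.head' hd hy)
              · exact (h2name y hy').1 hyP
            · intro x hx
              rcases (PySem.Set.mem_add _ _ _).mp hx with hxd | rfl
              · rcases h3 x hxd with hP' | hcl
                · exact Or.inl (Finset.mem_insert_of_mem hP')
                · exact Or.inr hcl
              · exact Or.inl (Finset.mem_insert_self _ _)
            · exact h4
          · have hd0 : pvGetRefs m name = [] := pvGetRefs_of_not_key hk
            have hA0 : addNamesA m fuel r [] = r := by cases fuel <;> simp [addNamesA]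
            rw [hd0, List.foldl_nil, hA0]
            refine ⟨rfl, h4, ?_, fun x hx => hx, fun d hd => absurd hd (List.not_mem_nil)⟩
            intro x hx
            rcases (PySem.Set.mem_add _ _ _).mp hx with hxd | rfl
            · rcases h3 x hxd with hP' | hcl
              · exact Or.inl (Finset.mem_insert_of_mem hP')
              · exact Or.inr hcl
            · exact Or.inl (Finset.mem_insert_self _ _)
        obtain ⟨hB1, hB2, hB3, hB4, hB5⟩ := hDeps
        set rd := addNamesA m fuel r (pvGetRefs m name) with hrddef
        set stD := List.foldl (visitB m fuel) (r, inres, PySem.Set.add done name) (pvGetRefs m name) with hstDdef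
        have hv : visitB m (fuel + 1) (r, inres, done) name =
            if name ∈ stD.2.1 then stD else (stD.1 ++ [name], PySem.Set.add stD.2.1 name, stD.2.2) := by
          simp [visitB, hdone, hstDdef]
        set r2 := if name ∈ rd then rd else rd ++ [name] with hr2def
        have hrd_sub : ∀ x ∈ rd, x ∈ r2 := by
          intro x hx
          rw [hr2def]
          split
          · exact hx
          · exact List.mem_append.mpr (Or.inl hx)
        have hname_r2 : name ∈ r2 := by
          rw [hr2def]
          split
          · assumption
          · exact List.mem_append.mpr (Or.inr (List.mem_singleton.mpr rfl))
        set st2 := if name ∈ stD.2.1 then stD else (stD.1 ++ [name], PySem.Set.add stD.2.1 name, stD.2.2) with hst2def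
        have hst2 : st2 = (r2, st2.2.1, stD.2.2) := by
          rw [hst2def, hr2def]
          by_cases hnm : name ∈ rd
          · rw [if_pos ((hB2 name).mpr hnm), if_pos hnm, hB1]
          · rw [if_neg (fun h => hnm ((hB2 name).mp h)), if_neg hnm, hB1]
        have hinres2 : ∀ x, x ∈ st2.2.1 ↔ x ∈ r2 := by
          intro x
          rw [hst2def, hr2def]
          by_cases hnm : name ∈ rd
          · rw [if_pos ((hB2 name).mpr hnm), if_pos hnm]
            exact hB2 x
          · rw [if_neg (fun h => hnm ((hB2 name).mp h)), if_neg hnm]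
            show x ∈ PySem.Set.add stD.2.1 name ↔ _
            rw [PySem.Set.mem_add stD.2.1 name x]
            simp only [List.mem_append, List.mem_singleton, hB2 x]
        have hclname : pvClosed m r2 name := by
          intro y hy
          rcases Relation.ReflTransGen.cases_head hy with rfl | ⟨c, hc, hcy⟩
          · exact hname_r2
          · exact hrd_sub y (hB5 c hc y hcy)
        have hA : addNamesA m (fuel + 1) r (name :: rest) = addNamesA m (fuel + 1) r2 rest := by
          simp only [addNamesA, ← hrddef, ← hr2def]
        obtain ⟨hC1, hC2, hC3, hC4, hC5⟩ := ihns r2 st2.2.1 stD.2.2 P h1 h2rest (by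
            intro x hx
            rcases hB3 x hx with hI | hcl
            · rcases Finset.mem_insert.mp hI with rfl | hP'
              · exact Or.inr hclname
              · exact Or.inl hP'
            · exact Or.inr (pvClosed_mono hcl hrd_sub)) hinres2
        rw [List.foldl_cons, hv, hst2, hA]
        refine ⟨hC1, hC2, hC3, ?_, ?_⟩
        · exact fun x hx => hC4 x (hrd_sub x (hB4 x hx))
        · intro nm hnm
          rcases List.mem_cons.mp hnm with rfl | hnm
          · exact pvClosed_mono hclname hC4
          · exact hC5 nm hnm

-- ===== VERDICT (by name: the statement is the Claim_ definition above) =====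
theorem add_names_with_referenced_names_recursively_spec : Claim_equal_add_names_with_referenced_names_recursively := by
  intro r ns m _ hpre
  unfold Spec_add_names_with_referenced_names_recursively
  unfold add_names_with_referenced_names_recursively add_names_with_referenced_names_recursively_alt
  refine (mainSim m (m.length + 1) ns r (PySem.Set.ofList r) PySem.Set.empty ∅ ?_ ?_ ?_ ?_).1
  · rw [Finset.sdiff_empty]
    have h := List.toFinset_card_le (m.map Prod.fst)
    rw [List.length_map] at h
    have : (pvKeys m).card ≤ m.length := h
    omega
  · exact fun nm hnm y hy =>
      ⟨fun h => absurd h (Finset.notMem_empty y), pre_acyclic hpre ⟨nm, hnm, hy⟩⟩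
  · intro x hx
    exact absurd hx (List.not_mem_nil)
  · exact fun x => PySem.Set.mem_ofList r x
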